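-- pv_equiv track=rewrite | github.com/huiman2/huiman2 | python project.py | rotate_diagonalSW_part1
-- ===== SOURCE A (Python) =====
-- def rotate_diagonalSW_part1(word_board):
--     '''(list) -> (list)
--     Rotates the first half of the board in the SW direction
--
--     >>> rotate_diagonalSW_part1(word_board2)
--     [['f'], ['x', 'i'], ['u', 'l', 'p'], ['e', 'k', 'w', 'd']]
--     '''
--     # finds the number of columns
--     number_columns = len(word_board[0])
--     # creates an empty list for the final output list of list
--     rotated_board = []
--     new_row = []
--     # goes through each column and selects specific letters for the list
--     for i in range (number_columns):
--         new_row.append(word_board[0][i])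
--         for j in range (i):
--             new_row.append(word_board[j+1][i-1-j])
--         # creates new list of list with diagonal letters going SW
--         rotated_board.append(new_row)
--         new_row = []
--     return rotated_board
-- ===== SOURCE B (Python) =====
-- def rotate_diagonalSW_part1(word_board):
--     # Bucket approach: walk the board row-major once and drop each cell
--     # word_board[p][c] with p+c < number_columns into bucket p+c.
--     number_columns = len(word_board[0])
--     buckets = [[] for _ in range(number_columns)]
--     for p, row in enumerate(word_board[:number_columns]):
--         for c, letter in enumerate(row[:number_columns - p]):
--             buckets[p + c].append(letter)
--     return buckets
-- ===== Notes on version B (the rewrite author's own statement) =====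
-- stated objective: alternative
-- what changed: A builds each SW-diagonal row by its own index arithmetic (row i = board[0][i] then board[j+1][i-1-j]); B makes a single row-major pass over the board, dropping each cell board[p][c] with p+c < number_columns into bucket p+c and returning the buckets.
import Mathlib
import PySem

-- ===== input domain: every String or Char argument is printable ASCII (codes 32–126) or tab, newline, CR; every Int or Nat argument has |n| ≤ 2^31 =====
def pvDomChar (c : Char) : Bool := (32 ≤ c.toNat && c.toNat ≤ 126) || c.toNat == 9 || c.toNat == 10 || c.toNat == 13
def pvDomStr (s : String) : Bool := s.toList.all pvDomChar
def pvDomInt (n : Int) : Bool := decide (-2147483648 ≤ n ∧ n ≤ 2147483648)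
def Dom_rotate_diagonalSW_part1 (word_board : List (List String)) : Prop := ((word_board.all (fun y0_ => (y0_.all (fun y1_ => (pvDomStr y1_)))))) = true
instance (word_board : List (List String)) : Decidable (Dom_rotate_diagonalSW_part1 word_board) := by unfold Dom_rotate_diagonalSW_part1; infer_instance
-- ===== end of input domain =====

-- B replaces A's per-diagonal index arithmetic by a single row-major pass that drops each
-- cell word_board[p][c] with p+c < number_columns into bucket p+c (objective: alternative).
-- The proved equivalence is about return values on Pre_ (inputs where A does not raise).

-- ===== PORT A =====
-- All index expressions below are nonnegative in Python; on inputs inside Pre_ every access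
-- is in range, so List.getD with a default is exact there (out-of-range = Python IndexError,
-- excluded by Pre_).
def rotate_diagonalSW_part1 (word_board : List (List String)) : List (List String) :=
  let number_columns := (word_board.getD 0 []).length
  (List.range number_columns).foldl
    (fun rotated_board i =>
      let new_row :=
        (List.range i).foldl
          (fun nr j => nr ++ [(word_board.getD (j + 1) []).getD (i - 1 - j) ""])
          [(word_board.getD 0 []).getD i ""]
      rotated_board ++ [new_row])
    []

-- ===== PORT B =====
-- zipIdx is the transliteration of Python's enumerate (Nat indices; all nonnegative).
def rotate_diagonalSW_part1_alt (word_board : List (List String)) : List (List String) :=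
  let number_columns := (word_board.getD 0 []).length
  ((word_board.take number_columns).zipIdx).foldl
    (fun buckets rp =>
      ((rp.1.take (number_columns - rp.2)).zipIdx).foldl
        (fun bk lc =>
          bk.set (rp.2 + lc.2) (bk.getD (rp.2 + lc.2) [] ++ [lc.1]))
        buckets)
    (List.replicate number_columns ([] : List String))

-- ===== PRECONDITION & SPEC =====
-- Pre_ = exactly the inputs where A returns: the board is nonempty, has at least as many rows
-- as row 0 has columns (n), and row p reaches at least column n-1-p; elsewhere A raises IndexError.
def Pre_rotate_diagonalSW_part1 (word_board : List (List String)) : Prop :=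
  word_board ≠ [] ∧
  (word_board.getD 0 []).length ≤ word_board.length ∧
  ∀ p < (word_board.getD 0 []).length,
    (word_board.getD 0 []).length - p ≤ (word_board.getD p []).length
instance (word_board : List (List String)) : Decidable (Pre_rotate_diagonalSW_part1 word_board) := by
  unfold Pre_rotate_diagonalSW_part1; infer_instance

def pvWitness_rotate_diagonalSW_part1 : List (List String) :=
  [["f", "x", "u", "e"], ["i", "l", "k"], ["p", "w"], ["d"]]

def Spec_rotate_diagonalSW_part1 (word_board : List (List String)) (out : List (List String)) : Prop := out = rotate_diagonalSW_part1_alt word_board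
instance (word_board : List (List String)) (out : List (List String)) : Decidable (Spec_rotate_diagonalSW_part1 word_board out) := by unfold Spec_rotate_diagonalSW_part1; infer_instance

-- ===== CLAIM (what is proved, stated in full; the proofs are below) =====
def Claim_equal_rotate_diagonalSW_part1 : Prop := ∀ (word_board : List (List String)), Dom_rotate_diagonalSW_part1 word_board → Pre_rotate_diagonalSW_part1 word_board → Spec_rotate_diagonalSW_part1 word_board (rotate_diagonalSW_part1 word_board)
-- ===== LEMMAS AND PROOFS =====

-- cell (p, c) of the board, and the closed-form description both ports meet
def pvG (wb : List (List String)) (p c : Nat) : String := (wb.getD p []).getD c ""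

def pvSpec (wb : List (List String)) : List (List String) :=
  (List.range (wb.getD 0 []).length).map
    (fun i => (List.range (i + 1)).map (fun p => pvG wb p (i - p)))

theorem portA_eq_spec (wb : List (List String)) :
    rotate_diagonalSW_part1 wb = pvSpec wb := by
  unfold rotate_diagonalSW_part1 pvSpec
  rw [PySem.List.foldl_append_singleton_eq_map]
  simp only [List.nil_append]
  refine List.map_congr_left ?_
  intro i _
  rw [PySem.List.foldl_append_singleton_eq_map, List.range_succ_eq_map, List.map_cons,
      List.map_map]
  simp only [pvG, Nat.sub_zero, List.singleton_append]
  congr 1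
  refine List.map_congr_left ?_
  intro j _
  simp only [Function.comp, Nat.succ_eq_add_one]
  congr 1
  omega


theorem fill_getD (l : List String) :
    ∀ (s q i : Nat) (bk : List (List String)), q + s + l.length ≤ bk.length →
    (((l.zipIdx s).foldl
        (fun bk lc => bk.set (q + lc.2) (bk.getD (q + lc.2) [] ++ [lc.1])) bk).getD i []) =
      bk.getD i [] ++
        (if q + s ≤ i ∧ i < q + s + l.length then [l.getD (i - q - s) ""] else []) := by
  induction l with
  | nil =>
    intro s q i bk _
    simp only [List.zipIdx_nil, List.foldl_nil, List.length_nil]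
    rw [if_neg (by omega)]
    simp
  | cons a l ih =>
    intro s q i bk hbk
    rw [List.zipIdx_cons, List.foldl_cons]
    rw [ih (s+1) q i _ (by simp only [List.length_set]; simp only [List.length_cons] at hbk; omega)]
    by_cases hi : i = q + s
    · subst hi
      rw [if_neg (by omega), if_pos (by simp only [List.length_cons]; omega)]
      have hlt : q + s < bk.length := by simp only [List.length_cons] at hbk; omega
      simp only [List.getD, List.getElem?_set_self hlt, Option.getD_some, List.append_nil]
      have h0 : q + s - q - s = 0 := by omega
      rw [h0]
      simp
    · have hne : (bk.set (q+s) (bk.getD (q+s) [] ++ [a])).getD i [] = bk.getD i [] := by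
        simp only [List.getD, List.getElem?_set_ne (by omega : q + s ≠ i)]
      rw [hne]
      congr 1
      by_cases h1 : q + (s + 1) ≤ i ∧ i < q + (s + 1) + l.length
      · rw [if_pos h1, if_pos (by simp only [List.length_cons]; omega)]
        have h2 : i - q - s = (i - q - (s+1)) + 1 := by omega
        rw [h2]
        simp
      · rw [if_neg h1, if_neg (by simp only [List.length_cons]; omega)]


theorem fill_length (l : List String) (q : Nat) :
    ∀ (s : Nat) (bk : List (List String)),
    ((l.zipIdx s).foldl
        (fun bk lc => bk.set (q + lc.2) (bk.getD (q + lc.2) [] ++ [lc.1])) bk).length =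
      bk.length := by
  induction l with
  | nil => intro s bk; simp
  | cons a l ih =>
    intro s bk
    rw [List.zipIdx_cons, List.foldl_cons, ih]
    simp


theorem outer_length (n : Nat) (rows : List (List String)) :
    ∀ (s : Nat) (bk : List (List String)),
    ((rows.zipIdx s).foldl
        (fun buckets rp =>
          ((rp.1.take (n - rp.2)).zipIdx).foldl
            (fun bk lc => bk.set (rp.2 + lc.2) (bk.getD (rp.2 + lc.2) [] ++ [lc.1])) buckets)
        bk).length = bk.length := by
  induction rows with
  | nil => intro s bk; simp
  | cons r rows ih =>
    intro s bk
    rw [List.zipIdx_cons, List.foldl_cons, ih, fill_length]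


theorem outer_getD (n : Nat) (rows : List (List String)) :
    ∀ (s i : Nat) (bk : List (List String)), bk.length = n → s + rows.length ≤ n →
    ((rows.zipIdx s).foldl
        (fun buckets rp =>
          ((rp.1.take (n - rp.2)).zipIdx).foldl
            (fun bk lc => bk.set (rp.2 + lc.2) (bk.getD (rp.2 + lc.2) [] ++ [lc.1])) buckets)
        bk).getD i [] =
      bk.getD i [] ++
        (rows.zipIdx s).flatMap
          (fun rp =>
            if rp.2 ≤ i ∧ i < rp.2 + (rp.1.take (n - rp.2)).length then
              [(rp.1.take (n - rp.2)).getD (i - rp.2) ""]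
            else []) := by
  induction rows with
  | nil => intro s i bk _ _; simp
  | cons r rows ih =>
    intro s i bk hbk hlen
    rw [List.zipIdx_cons, List.foldl_cons]
    rw [ih (s+1) i _ (by rw [fill_length]; exact hbk) (by simp only [List.length_cons] at hlen; omega)]
    rw [List.flatMap_cons]
    have htake : s + 0 + (r.take (n - s)).length ≤ bk.length := by
      have := List.length_take_le (n - s) r
      simp only [List.length_cons] at hlen; omega
    have hfill := fill_getD (r.take (n - s)) 0 s i bk htake
    simp only [Nat.add_zero, Nat.sub_zero] at hfill
    dsimp only
    rw [hfill, List.append_assoc]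


theorem flat_eval (n : Nat) (rows : List (List String)) :
    ∀ (s i : Nat), i < n →
    (∀ k < rows.length, n - (s + k) ≤ (rows.getD k []).length) →
    (rows.zipIdx s).flatMap
        (fun rp =>
          if rp.2 ≤ i ∧ i < rp.2 + (rp.1.take (n - rp.2)).length then
            [(rp.1.take (n - rp.2)).getD (i - rp.2) ""]
          else []) =
      (List.range (min (i + 1) (s + rows.length) - s)).map
        (fun t => (rows.getD t []).getD (i - (s + t)) "") := by
  induction rows with
  | nil => intro s i _ _; simp
  | cons r rows ih =>
    intro s i hi hrows
    rw [List.zipIdx_cons, List.flatMap_cons]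
    have hr0 : n - s ≤ r.length := by
      have := hrows 0 (by simp); simpa using this
    have hrec := ih (s + 1) i hi (by
      intro k hk
      have h := hrows (k + 1) (by simp; omega)
      rw [List.getD_cons_succ] at h
      omega)
    rw [hrec]
    by_cases hs : s ≤ i
    · have htl : (r.take (n - s)).length = n - s := by
        rw [List.length_take]; omega
      rw [if_pos ⟨hs, by rw [htl]; omega⟩]
      dsimp only
      have hm : min (i + 1) (s + (r :: rows).length) - s = (min (i + 1) (s + 1 + rows.length) - (s + 1)) + 1 := by
        simp only [List.length_cons]; omega
      rw [hm, List.range_succ_eq_map, List.map_cons, List.map_map, List.singleton_append]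
      congr 1
      · rw [List.getD_cons_zero, Nat.add_zero, List.getD_eq_getElem?_getD,
            List.getElem?_take, if_pos (by omega : i - s < n - s),
            ← List.getD_eq_getElem?_getD]
      · refine List.map_congr_left ?_
        intro t _
        simp only [Function.comp, Nat.succ_eq_add_one, List.getD_cons_succ]
        congr 1
        omega
    · rw [if_neg (by omega)]
      have h1 : min (i + 1) (s + 1 + rows.length) - (s + 1) = 0 := by omega
      have h2 : min (i + 1) (s + (r :: rows).length) - s = 0 := by
        simp only [List.length_cons]; omega
      rw [h1, h2]
      simp


theorem portB_eq_spec (wb : List (List String)) (h : Pre_rotate_diagonalSW_part1 wb) :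
    rotate_diagonalSW_part1_alt wb = pvSpec wb := by
  obtain ⟨-, hle, hrow⟩ := h
  set n := (wb.getD 0 []).length with hn
  have hrows_len : (wb.take n).length = n := by
    rw [List.length_take]; omega
  have hrows_getD : ∀ k < n, (wb.take n).getD k [] = wb.getD k [] := by
    intro k hk
    rw [List.getD_eq_getElem?_getD, List.getD_eq_getElem?_getD, List.getElem?_take, if_pos hk]
  have hBlen : (rotate_diagonalSW_part1_alt wb).length = n := by
    unfold rotate_diagonalSW_part1_alt
    rw [← hn, outer_length, List.length_replicate]
  have hSlen : (pvSpec wb).length = n := by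
    unfold pvSpec
    rw [← hn, List.length_map, List.length_range]
  refine List.ext_getElem (by rw [hBlen, hSlen]) ?_
  intro i h1 h2
  rw [hBlen] at h1
  have hB : (rotate_diagonalSW_part1_alt wb).getD i [] =
      (List.range (i + 1)).map (fun t => pvG wb t (i - t)) := by
    unfold rotate_diagonalSW_part1_alt
    rw [← hn, outer_getD n _ 0 i _ (List.length_replicate) (by rw [hrows_len]; omega),
        flat_eval n _ 0 i h1
          (by intro k hk; rw [hrows_len] at hk; rw [hrows_getD k hk, Nat.zero_add]; exact hrow k hk)]
    rw [List.getD_eq_getElem?_getD, List.getElem?_replicate]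
    simp only [hrows_len, Nat.zero_add, Nat.min_def, if_pos (by omega : i + 1 ≤ n), Nat.sub_zero]
    rw [if_pos h1]
    simp only [Option.getD_some, List.nil_append]
    refine List.map_congr_left ?_
    intro t ht
    rw [List.mem_range] at ht
    rw [hrows_getD t (by omega)]
    rfl
  have hS : (pvSpec wb)[i]'h2 = (List.range (i + 1)).map (fun t => pvG wb t (i - t)) := by
    unfold pvSpec
    simp
  rw [hS, ← hB, List.getD_eq_getElem?_getD, List.getElem?_eq_getElem (by rw [hBlen]; exact h1)]
  rfl


-- ===== VERDICT (by name: the statement is the Claim_ definition above) =====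
theorem rotate_diagonalSW_part1_spec : Claim_equal_rotate_diagonalSW_part1 := by
  intro wb _ hpre
  unfold Spec_rotate_diagonalSW_part1
  rw [portA_eq_spec, portB_eq_spec wb hpre]
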